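-- pv_equiv track=rewrite | github.com/66maer/yang-paibiao | yang_bot/tests/test_parsing.py | parse_signup_args
-- ===== SOURCE A (Python) =====
-- def parse_signup_args(text):
--     """复制自 matchers.py 的 parse_signup_args，确保逻辑一致"""
--     from typing import Optional, Tuple
--     parts = text.strip().split()
--     if not parts:
--         return None, None, None
--
--     team_index = None
--     non_number_parts = []
--
--     for part in parts:
--         try:
--             num = int(part)
--             if team_index is None:
--                 team_index = num
--             else:
--                 non_number_parts.append(part)
--         except ValueError:
--             non_number_parts.append(part)
--
--     arg1 = non_number_parts[0] if len(non_number_parts) > 0 else None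
--     arg2 = non_number_parts[1] if len(non_number_parts) > 1 else None
--
--     return team_index, arg1, arg2
-- ===== SOURCE B (Python) =====
-- def _is_int(tok):
--     try:
--         int(tok)
--         return True
--     except ValueError:
--         return False
--
--
-- def parse_signup_args(text):
--     parts = text.strip().split()
--     if not parts:
--         return None, None, None
--     idx = next((i for i, p in enumerate(parts) if _is_int(p)), None)
--     if idx is None:
--         team_index, rest = None, parts
--     else:
--         team_index, rest = int(parts[idx]), parts[:idx] + parts[idx + 1:]
--     return (team_index,
--             rest[0] if rest else None,
--             rest[1] if len(rest) > 1 else None)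
-- ===== Notes on version B (the rewrite author's own statement) =====
-- stated objective: alternative
-- what changed: Instead of folding over all tokens with a mutable (team_index, non_number_parts) accumulator, B locates the index of the first int-parsing token in one scan and slices it out, returning the remaining tokens directly.
import Mathlib
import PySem

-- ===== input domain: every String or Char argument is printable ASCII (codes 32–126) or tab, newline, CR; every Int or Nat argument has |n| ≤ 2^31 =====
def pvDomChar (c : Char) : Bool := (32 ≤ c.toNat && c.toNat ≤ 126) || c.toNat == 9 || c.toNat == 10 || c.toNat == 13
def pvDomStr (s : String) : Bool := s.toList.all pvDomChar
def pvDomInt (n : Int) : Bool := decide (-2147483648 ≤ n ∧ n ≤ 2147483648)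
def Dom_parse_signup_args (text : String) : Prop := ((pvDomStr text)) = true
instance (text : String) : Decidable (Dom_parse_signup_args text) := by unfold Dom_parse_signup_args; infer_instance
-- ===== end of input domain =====

-- B replaces A's fold with a (team_index, non-number list) accumulator by a single
-- find-first-int-token scan plus slicing that token out: alternative decomposition, same cost.

-- ===== PORT A =====
-- one loop step of A: try int(part); first int becomes team_index, everything else is appended
def pa_step (st : Option Int × List String) (part : String) : Option Int × List String :=
  match PySem.Int.ofStr? part with
  | some num =>
    match st.1 with
    | none => (some num, st.2)
    | some _ => (st.1, st.2 ++ [part])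
  | none => (st.1, st.2 ++ [part])

def parse_signup_args (text : String) : Option Int × Option String × Option String :=
  let parts := PySem.Str.split₀ (PySem.Str.strip text)
  if parts = [] then (none, none, none)
  else
    let st := parts.foldl pa_step (none, [])
    let arg1 := if st.2.length > 0 then st.2[0]? else none
    let arg2 := if st.2.length > 1 then st.2[1]? else none
    (st.1, arg1, arg2)

-- ===== PORT B =====
-- is_int(tok) = 'int(tok) succeeds'
def pb_isInt (tok : String) : Bool := (PySem.Int.ofStr? tok).isSome

def parse_signup_args_alt (text : String) : Option Int × Option String × Option String :=
  let parts := PySem.Str.split₀ (PySem.Str.strip text)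
  if parts = [] then (none, none, none)
  else
    match parts.findIdx? pb_isInt with            -- next((i for i,p in enumerate(parts) if is_int(p)), None)
    | none => (none, parts[0]?, parts[1]?)
    | some idx =>
      let rest := parts.take idx ++ parts.drop (idx + 1)   -- parts[:idx] + parts[idx+1:] (idx ≥ 0, in range)
      ((parts[idx]?).bind PySem.Int.ofStr?, rest[0]?, rest[1]?)

-- ===== PRECONDITION & SPEC =====
def Spec_parse_signup_args (text : String) (out : Option Int × Option String × Option String) : Prop := out = parse_signup_args_alt text
instance (text : String) (out : Option Int × Option String × Option String) : Decidable (Spec_parse_signup_args text out) := by unfold Spec_parse_signup_args; infer_instance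

-- ===== CLAIM (what is proved, stated in full; the proofs are below) =====
def Claim_equal_parse_signup_args : Prop := ∀ (text : String), Dom_parse_signup_args text → Spec_parse_signup_args text (parse_signup_args text)

-- ===== LEMMAS AND PROOFS =====

-- once team_index is set, every remaining token is appended
theorem pa_fold_some (ps : List String) (t : Int) (acc : List String) :
    ps.foldl pa_step (some t, acc) = (some t, acc ++ ps) := by
  induction ps generalizing acc with
  | nil => simp
  | cons p ps ih =>
    simp only [List.foldl_cons, pa_step]
    cases PySem.Int.ofStr? p <;> simp [ih]

-- A's fold, characterised by the first int-parsing token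
theorem pa_fold_char (ps : List String) (acc : List String) :
    ps.foldl pa_step (none, acc) =
      match ps.findIdx? pb_isInt with
      | none => (none, acc ++ ps)
      | some i => ((ps[i]?).bind PySem.Int.ofStr?, acc ++ (ps.take i ++ ps.drop (i + 1))) := by
  induction ps generalizing acc with
  | nil => simp
  | cons p ps ih =>
    simp only [List.foldl_cons, pa_step]
    rw [List.findIdx?_cons]
    cases h : PySem.Int.ofStr? p with
    | some n =>
      have : pb_isInt p = true := by simp [pb_isInt, h]
      simp only [this, if_true, pa_fold_some, List.getElem?_cons_zero]
      simp [h]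
    | none =>
      have hb : pb_isInt p = false := by simp [pb_isInt, h]
      simp only [hb, Bool.false_eq_true, if_false]
      rw [ih]
      cases hf : ps.findIdx? pb_isInt with
      | none => simp
      | some i => simp [List.take_succ_cons, List.drop_succ_cons]

-- the two branch bodies agree for ANY token list
theorem pa_key (parts : List String) :
    (if parts = [] then ((none : Option Int), (none : Option String), (none : Option String))
     else
       let st := parts.foldl pa_step (none, [])
       (st.1, (if st.2.length > 0 then st.2[0]? else none), (if st.2.length > 1 then st.2[1]? else none))) =
    (if parts = [] then (none, none, none)
     else
       match parts.findIdx? pb_isInt with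
       | none => (none, parts[0]?, parts[1]?)
       | some idx =>
         let rest := parts.take idx ++ parts.drop (idx + 1)
         ((parts[idx]?).bind PySem.Int.ofStr?, rest[0]?, rest[1]?)) := by
  by_cases hE : parts = []
  · simp [hE]
  · simp only [hE, if_false]
    rw [show parts.foldl pa_step (none, []) = _ from pa_fold_char parts []]
    cases hf : parts.findIdx? pb_isInt with
    | none => simp
    | some i => simp

-- ===== VERDICT (by name: the statement is the Claim_ definition above) =====
theorem parse_signup_args_spec : Claim_equal_parse_signup_args :=
  fun text _ => pa_key (PySem.Str.split₀ (PySem.Str.strip text))
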